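-- pv_equiv track=rewrite | github.com/Ciarands/eplayers-resolver | resolver.py | get_final_key
-- ===== SOURCE A (Python) =====
-- def get_final_key(deob_key) -> list:
--     '''
--         Get final extraction key.
--
--         Returns:
--             (list): list of integers to get key
--     '''
--     current_sum = 0
--     final_key = []
--
--     for first_term, second_term in deob_key:
--         first_term += current_sum
--         current_sum += second_term
--         second_term += first_term
--         final_key.append([first_term,second_term])
--
--     return final_key
-- ===== SOURCE B (Python) =====
-- from itertools import accumulate
--
-- def get_final_key(deob_key) -> list:
--     pairs = [(first_term, second_term) for first_term, second_term in deob_key]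
--     seconds = [b for _, b in pairs]
--     prefixes = [0] + list(accumulate(seconds))[:-1] if pairs else []
--     return [[a + p, a + b + p] for (a, b), p in zip(pairs, prefixes)]
-- ===== Notes on version B (the rewrite author's own statement) =====
-- stated objective: alternative
-- what changed: B separates the computation into two passes: it first builds an exclusive prefix-sum table of the second components with itertools.accumulate, then emits each output row from its pair and prefix in a comprehension, instead of threading a running sum through a single loop.
import Mathlib
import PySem

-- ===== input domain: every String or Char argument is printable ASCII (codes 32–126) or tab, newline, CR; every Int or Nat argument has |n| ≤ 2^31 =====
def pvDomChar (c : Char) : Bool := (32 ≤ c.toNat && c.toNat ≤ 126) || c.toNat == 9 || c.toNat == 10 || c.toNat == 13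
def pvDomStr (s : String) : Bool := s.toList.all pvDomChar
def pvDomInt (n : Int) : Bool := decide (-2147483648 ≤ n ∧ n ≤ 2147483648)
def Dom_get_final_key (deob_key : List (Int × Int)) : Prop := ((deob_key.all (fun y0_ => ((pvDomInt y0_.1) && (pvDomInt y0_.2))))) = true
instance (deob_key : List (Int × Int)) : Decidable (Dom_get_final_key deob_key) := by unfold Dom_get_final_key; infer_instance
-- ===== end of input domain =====

-- B replaces A's single loop threading a running sum with two passes: an exclusive
-- prefix-sum table of the second components, then a zip/map emitting each row (alternative, same cost).

-- ===== PORT A =====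
-- A's loop: state is (current_sum, final_key); each step appends [first', second'].
def get_final_key (deob_key : List (Int × Int)) : List (List Int) :=
  (deob_key.foldl
    (fun (st : Int × List (List Int)) ab =>
      let first_term := ab.1 + st.1          -- first_term += current_sum
      let current_sum := st.1 + ab.2         -- current_sum += second_term
      let second_term := ab.2 + first_term   -- second_term += first_term
      (current_sum, st.2 ++ [[first_term, second_term]]))
    (0, [])).2

-- ===== PORT B =====
-- itertools.accumulate (inclusive running sums starting from s)
def pvAccumulate (s : Int) : List Int → List Int
  | [] => []
  | x :: xs => (s + x) :: pvAccumulate (s + x) xs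

def get_final_key_alt (deob_key : List (Int × Int)) : List (List Int) :=
  let pairs := deob_key
  let seconds := pairs.map (fun p => p.2)
  let prefixes := if pairs = [] then [] else 0 :: (pvAccumulate 0 seconds).dropLast
  (pairs.zip prefixes).map (fun z => [z.1.1 + z.2, z.1.1 + z.1.2 + z.2])

-- ===== PRECONDITION & SPEC =====
def Spec_get_final_key (deob_key : List (Int × Int)) (out : List (List Int)) : Prop := out = get_final_key_alt deob_key
instance (deob_key : List (Int × Int)) (out : List (List Int)) : Decidable (Spec_get_final_key deob_key out) := by unfold Spec_get_final_key; infer_instance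

-- ===== CLAIM (what is proved, stated in full; the proofs are below) =====
def Claim_equal_get_final_key : Prop := ∀ (deob_key : List (Int × Int)), Dom_get_final_key deob_key → Spec_get_final_key deob_key (get_final_key deob_key)

-- ===== LEMMAS AND PROOFS =====

-- reference recursion both ports are reduced to
def pvSpecRun (s : Int) : List (Int × Int) → List (List Int)
  | [] => []
  | (a, b) :: xs => [a + s, a + b + s] :: pvSpecRun (s + b) xs

theorem pvFoldA (xs : List (Int × Int)) : ∀ (s : Int) (acc : List (List Int)),
    (xs.foldl
      (fun (st : Int × List (List Int)) ab =>
        let first_term := ab.1 + st.1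
        let current_sum := st.1 + ab.2
        let second_term := ab.2 + first_term
        (current_sum, st.2 ++ [[first_term, second_term]]))
      (s, acc)).2 = acc ++ pvSpecRun s xs := by
  induction xs with
  | nil => intro s acc; simp [pvSpecRun]
  | cons ab xs ih =>
    intro s acc
    obtain ⟨a, b⟩ := ab
    simp only [List.foldl, pvSpecRun, ih, List.append_assoc, List.cons_append, List.nil_append]
    ring_nf

theorem pvZipB (xs : List (Int × Int)) : ∀ (s : Int),
    ((xs.zip (s :: (pvAccumulate s (xs.map (fun p => p.2))).dropLast)).map
      (fun z => [z.1.1 + z.2, z.1.1 + z.1.2 + z.2])) = pvSpecRun s xs := by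
  induction xs with
  | nil => intro s; simp [pvSpecRun]
  | cons ab xs ih =>
    intro s
    obtain ⟨a, b⟩ := ab
    simp only [List.map, pvAccumulate, pvSpecRun]
    cases hx : xs with
    | nil => subst hx; simp [pvSpecRun]
    | cons y ys =>
      subst hx
      have hne : pvAccumulate (s + b) (List.map (fun p => p.2) (y :: ys)) ≠ [] := by
        simp [pvAccumulate]
      rw [List.dropLast_cons_of_ne_nil hne, List.zip_cons_cons, List.map_cons, ih (s + b)]

-- ===== VERDICT (by name: the statement is the Claim_ definition above) =====
theorem get_final_key_spec : Claim_equal_get_final_key := by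
  intro xs _
  show get_final_key xs = get_final_key_alt xs
  simp only [get_final_key, get_final_key_alt, pvFoldA, List.nil_append]
  cases xs with
  | nil => simp [pvSpecRun]
  | cons ab ys =>
    rw [if_neg (List.cons_ne_nil ab ys), pvZipB]
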